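-- pv_equiv track=rewrite | github.com/palachintosh/insta_bot | insta_bot.py | array_sort
-- ===== SOURCE A (Python) =====
-- def array_sort(array, symbol):
--     new_array = []
--     counter = 0
--
--     for string in array:
--         if counter > 0:
--             if string == symbol:
--                 counter = 0
--             continue
--
--         if string == symbol:
--             counter += 1
--
--         if string != symbol and len(string) > 2 and string[0] != "/":
--             new_array.append(string)
--
--     return new_array
-- ===== SOURCE B (Python) =====
-- def array_sort(array, symbol):
--     # Pass 1: partition into groups delimited by `symbol` (N symbols -> N+1 groups).
--     groups = []
--     current = []
--     for s in array:
--         if s == symbol: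
--             groups.append(current)
--             current = []
--         else:
--             current.append(s)
--     groups.append(current)
--
--     # Pass 2: keep every other group (starting with the first), filtering its strings.
--     new_array = []
--     keep = True
--     for group in groups:
--         if keep:
--             for s in group:
--                 if len(s) > 2 and s[0] != "/":
--                     new_array.append(s)
--         keep = not keep
--     return new_array
-- ===== Notes on version B (the rewrite author's own statement) =====
-- stated objective: simpler
-- what changed: Replaces A's stateful toggling counter loop by a two-phase decomposition: first split the list into symbol-delimited groups, then keep the filtered strings of every other group.
import Mathlib
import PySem

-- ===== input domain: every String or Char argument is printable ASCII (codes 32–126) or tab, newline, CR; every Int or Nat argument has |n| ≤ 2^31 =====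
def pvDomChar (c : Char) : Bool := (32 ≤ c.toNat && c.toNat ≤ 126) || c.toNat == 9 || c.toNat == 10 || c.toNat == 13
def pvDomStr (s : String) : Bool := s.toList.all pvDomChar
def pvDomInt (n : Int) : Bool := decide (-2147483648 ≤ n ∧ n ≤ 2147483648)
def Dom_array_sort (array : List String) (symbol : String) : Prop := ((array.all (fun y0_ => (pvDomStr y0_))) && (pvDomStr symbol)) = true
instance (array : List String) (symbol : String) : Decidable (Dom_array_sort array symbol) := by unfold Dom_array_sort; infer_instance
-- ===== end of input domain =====

-- B replaces A's toggling-counter loop by a two-phase decomposition (split into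
-- symbol-delimited groups, then collect the filtered strings of every other group); same cost.


-- ===== PORT A =====
def array_sort (array : List String) (symbol : String) : List String :=
  (array.foldl (fun (st : List String × Int) string =>
      if st.2 > 0 then
        (st.1, if string = symbol then 0 else st.2)
      else
        let counter : Int := if string = symbol then st.2 + 1 else st.2
        if string ≠ symbol ∧ 2 < PySem.Str.len string ∧ PySem.Str.pyGet? string 0 ≠ some '/'
        then (st.1 ++ [string], counter)
        else (st.1, counter))
    ([], 0)).1

-- ===== PORT B =====
-- the per-string filter `len(s) > 2 and s[0] != "/"`
def pvKeep (s : String) : Bool :=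
  decide (2 < PySem.Str.len s ∧ PySem.Str.pyGet? s 0 ≠ some '/')

def array_sort_alt (array : List String) (symbol : String) : List String :=
  -- pass 1: split into symbol-delimited groups
  let split := array.foldl (fun (st : List (List String) × List String) s =>
      if s = symbol then (st.1 ++ [st.2], []) else (st.1, st.2 ++ [s])) ([], [])
  let groups := split.1 ++ [split.2]
  -- pass 2: keep every other group, filtered
  (groups.foldl (fun (p : List String × Bool) g =>
      (if p.2 then p.1 ++ g.filter pvKeep else p.1, !p.2)) ([], true)).1

-- ===== PRECONDITION & SPEC =====
def Spec_array_sort (array : List String) (symbol : String) (out : List String) : Prop := out = array_sort_alt array symbol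
instance (array : List String) (symbol : String) (out : List String) : Decidable (Spec_array_sort array symbol out) := by unfold Spec_array_sort; infer_instance

-- ===== CLAIM (what is proved, stated in full; the proofs are below) =====
def Claim_equal_array_sort : Prop := ∀ (array : List String) (symbol : String), Dom_array_sort array symbol → Spec_array_sort array symbol (array_sort array symbol)

-- ===== LEMMAS AND PROOFS =====

-- the result of A's loop starting in keep-mode (b = true) / skip-mode (b = false)
def pvAux (symbol : String) : Bool → List String → List String
  | _, [] => []
  | true, s :: r =>
      if s = symbol then pvAux symbol false r
      else (if pvKeep s then [s] else []) ++ pvAux symbol true r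
  | false, s :: r =>
      if s = symbol then pvAux symbol true r else pvAux symbol false r

-- recursive form of B's pass 1
def pvSplit (symbol : String) : List String → List String → List (List String)
  | [], cur => [cur]
  | s :: r, cur =>
      if s = symbol then cur :: pvSplit symbol r [] else pvSplit symbol r (cur ++ [s])

-- recursive form of B's pass 2
def pvCollect : Bool → List (List String) → List String
  | _, [] => []
  | b, g :: gs => (if b then g.filter pvKeep else []) ++ pvCollect (!b) gs

theorem pvA_inv (symbol : String) (l : List String) :
    ∀ (acc : List String) (b : Bool),
    (l.foldl (fun (st : List String × Int) string =>
      if st.2 > 0 then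
        (st.1, if string = symbol then 0 else st.2)
      else
        let counter : Int := if string = symbol then st.2 + 1 else st.2
        if string ≠ symbol ∧ 2 < PySem.Str.len string ∧ PySem.Str.pyGet? string 0 ≠ some '/'
        then (st.1 ++ [string], counter)
        else (st.1, counter))
      (acc, if b then 0 else 1)).1 = acc ++ pvAux symbol b l := by
  induction l with
  | nil => intro acc b; simp [pvAux]
  | cons s r ih =>
    intro acc b
    cases b with
    | true =>
      by_cases hs : s = symbol
      · simpa [List.foldl_cons, hs, pvAux] using ih acc false
      · simp [List.foldl_cons, hs, pvAux, pvKeep]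
        split <;> rename_i hk
        · simpa [hk] using ih (acc ++ [s]) true
        · simpa [hk] using ih acc true
    | false =>
      by_cases hs : s = symbol
      · simpa [List.foldl_cons, hs, pvAux] using ih acc true
      · simpa [List.foldl_cons, hs, pvAux] using ih acc false

theorem pvSplit_inv (symbol : String) (l : List String) :
    ∀ (gs : List (List String)) (cur : List String),
    (l.foldl (fun (st : List (List String) × List String) s =>
        if s = symbol then (st.1 ++ [st.2], []) else (st.1, st.2 ++ [s])) (gs, cur)).1
      ++ [(l.foldl (fun (st : List (List String) × List String) s =>
        if s = symbol then (st.1 ++ [st.2], []) else (st.1, st.2 ++ [s])) (gs, cur)).2]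
      = gs ++ pvSplit symbol l cur := by
  induction l with
  | nil => intro gs cur; simp [pvSplit]
  | cons s r ih =>
    intro gs cur
    by_cases hs : s = symbol
    · simpa [List.foldl_cons, hs, pvSplit] using ih (gs ++ [cur]) []
    · simpa [List.foldl_cons, hs, pvSplit] using ih gs (cur ++ [s])

theorem pvCollect_inv (gs : List (List String)) :
    ∀ (acc : List String) (b : Bool),
    (gs.foldl (fun (p : List String × Bool) g =>
        (if p.2 then p.1 ++ g.filter pvKeep else p.1, !p.2)) (acc, b)).1
      = acc ++ pvCollect b gs := by
  induction gs with
  | nil => intro acc b; simp [pvCollect]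
  | cons g gs ih =>
    intro acc b
    cases b with
    | true => simpa [List.foldl_cons, pvCollect] using ih (acc ++ g.filter pvKeep) false
    | false => simpa [List.foldl_cons, pvCollect] using ih acc true

theorem pvMain (symbol : String) (l : List String) :
    ∀ (cur : List String) (b : Bool),
    pvCollect b (pvSplit symbol l cur)
      = (if b then cur.filter pvKeep else []) ++ pvAux symbol b l := by
  induction l with
  | nil => intro cur b; cases b <;> simp [pvSplit, pvCollect, pvAux]
  | cons s r ih =>
    intro cur b
    by_cases hs : s = symbol
    · cases b with
      | true => simpa [pvSplit, hs, pvCollect, pvAux] using ih [] false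
      | false => simpa [pvSplit, hs, pvCollect, pvAux] using ih [] true
    · cases b with
      | true =>
        cases hk : pvKeep s <;>
          simpa [pvSplit, hs, pvAux, hk, List.filter_append] using ih (cur ++ [s]) true
      | false => simpa [pvSplit, hs, pvAux] using ih (cur ++ [s]) false

-- ===== VERDICT (by name: the statement is the Claim_ definition above) =====
theorem array_sort_spec : Claim_equal_array_sort := by
  intro array symbol _
  show array_sort array symbol = array_sort_alt array symbol
  have hA := pvA_inv symbol array [] true
  have hS := pvSplit_inv symbol array [] []
  have hC := pvCollect_inv ((array.foldl (fun (st : List (List String) × List String) s =>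
        if s = symbol then (st.1 ++ [st.2], []) else (st.1, st.2 ++ [s])) ([], [])).1
      ++ [(array.foldl (fun (st : List (List String) × List String) s =>
        if s = symbol then (st.1 ++ [st.2], []) else (st.1, st.2 ++ [s])) ([], [])).2]) [] true
  have hM := pvMain symbol array [] true
  simp only [List.nil_append, List.filter_nil] at hA hS hC hM
  simp only [array_sort, array_sort_alt]
  rw [hC, hS, hM]
  exact hA
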